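-- pv_equiv track=rewrite | github.com/Himanshu-Adhikari/cp-daily | solutions/2026-01-23/gfg_maximum-people-visible-in-a-line.py | maxPeople
-- ===== SOURCE A (Python) =====
-- def maxPeople(arr):
--     n=len(arr)
--     def rec(arr):
--         st=[]
--         fw=[n]*n
--         for i in range(n):
--             while(st and arr[st[-1]]<=arr[i]):
--                 fw[st[-1]]=i
--                 st.pop()
--             st.append(i)
--         return fw
--     f,s=rec(arr),rec(arr[::-1])
--     s=[n-x for x in s][::-1]
--     return max(i-j for i,j in zip(f,s))
-- ===== SOURCE B (Python) =====
-- def maxPeople(arr):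
--     n = len(arr)
--
--     def nxt(i):
--         # first index j > i with arr[j] >= arr[i], or n
--         j = i + 1
--         while j < n and arr[j] < arr[i]:
--             j += 1
--         return j
--
--     def prv(i):
--         # (last index j < i with arr[j] >= arr[i]) + 1, or 0
--         j = i
--         while j > 0 and arr[j - 1] < arr[i]:
--             j -= 1
--         return j
--
--     return max(nxt(i) - prv(i) for i in range(n))
-- ===== Notes on version B (the rewrite author's own statement) =====
-- stated objective: simpler
-- what changed: Replaces the monotonic-stack helper called twice (once on the reversed array, with an [n-x][::-1] index transform and a zip) by two direct linear scans per index that find the nearest >= neighbour on each side, combined in one generator.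
import Mathlib
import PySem

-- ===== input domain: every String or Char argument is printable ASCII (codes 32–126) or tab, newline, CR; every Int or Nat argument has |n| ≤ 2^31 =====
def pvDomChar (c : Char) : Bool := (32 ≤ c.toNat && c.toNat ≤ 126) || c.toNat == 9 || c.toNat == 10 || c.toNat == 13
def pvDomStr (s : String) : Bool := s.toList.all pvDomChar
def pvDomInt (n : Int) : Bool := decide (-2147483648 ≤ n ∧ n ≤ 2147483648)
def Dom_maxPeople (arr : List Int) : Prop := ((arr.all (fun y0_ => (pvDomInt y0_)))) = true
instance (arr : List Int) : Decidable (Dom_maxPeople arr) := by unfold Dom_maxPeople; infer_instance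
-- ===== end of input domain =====

-- B replaces A's monotonic-stack helper (run twice, with an array reversal and an index
-- transform) by two direct linear scans per index; objective: simpler, no speed claim.

-- ===== PORT A =====
-- inner while loop of rec: the stack is held head-first (head = Python st[-1]); while
-- arr[st[-1]] <= arr[i], set fw[st[-1]] = i and pop.  Every index on the stack and every
-- loop index is < len arr, so the getD defaults are unreachable.
def pvPop (arr : List Int) (ai : Int) (i : Nat) : List Nat → List Int → List Nat × List Int
  | [], fw => ([], fw)
  | t :: st, fw =>
      if arr.getD t 0 ≤ ai then pvPop arr ai i st (fw.set t (i : Int))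
      else (t :: st, fw)

-- one iteration of rec's for-loop: run the while loop, then st.append(i)
def pvStep (arr : List Int) (p : List Nat × List Int) (i : Nat) : List Nat × List Int :=
  let q := pvPop arr (arr.getD i 0) i p.1 p.2
  (i :: q.1, q.2)

-- rec(xs): st=[]; fw=[n]*n; for i in range(n): …; return fw   (n is the closure's len(arr))
def pvRec (arr : List Int) (n : Nat) : List Int :=
  ((List.range n).foldl (pvStep arr) ([], List.replicate n (n : Int))).2

def maxPeople (arr : List Int) : Int :=
  let n := arr.length
  let f := pvRec arr n
  let s := ((pvRec arr.reverse n).map (fun x => (n : Int) - x)).reverse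
  -- max(i-j for i,j in zip(f,s)); none only for arr = [] (ValueError), excluded by Pre_
  (PySem.List.max? ((f.zip s).map (fun p => p.1 - p.2)) (fun x => x)).getD 0

-- ===== PORT B =====
-- nxt(i): j=i+1; while j < n and arr[j] < arr[i]: j += 1; return j
def pvNxt (arr : List Int) (n : Nat) (ai : Int) (j : Nat) : Nat :=
  if h : j < n then
    if arr.getD j 0 < ai then pvNxt arr n ai (j + 1) else j
  else j
termination_by n - j

-- prv(i): j=i; while j > 0 and arr[j-1] < arr[i]: j -= 1; return j
def pvPrv (arr : List Int) (ai : Int) (j : Nat) : Nat :=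
  if h : 0 < j then
    if arr.getD (j - 1) 0 < ai then pvPrv arr ai (j - 1) else j
  else j
termination_by j

def maxPeople_alt (arr : List Int) : Int :=
  let n := arr.length
  -- max(nxt(i) - prv(i) for i in range(n)); none only for arr = [], excluded by Pre_
  (PySem.List.max? ((List.range n).map (fun i =>
      (pvNxt arr n (arr.getD i 0) (i + 1) : Int) - (pvPrv arr (arr.getD i 0) i : Int)))
    (fun x => x)).getD 0

-- ===== PRECONDITION & SPEC =====
-- Python's max(…) raises ValueError on an empty sequence, so A (and B) raise on arr = [].
def Pre_maxPeople (arr : List Int) : Prop := arr ≠ []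
instance (arr : List Int) : Decidable (Pre_maxPeople arr) := by unfold Pre_maxPeople; infer_instance

def pvWitness_maxPeople : List Int := [3, 1, 2]

def Spec_maxPeople (arr : List Int) (out : Int) : Prop := out = maxPeople_alt arr
instance (arr : List Int) (out : Int) : Decidable (Spec_maxPeople arr out) := by unfold Spec_maxPeople; infer_instance

-- ===== CLAIM (what is proved, stated in full; the proofs are below) =====
def Claim_equal_maxPeople : Prop := ∀ (arr : List Int), Dom_maxPeople arr → Pre_maxPeople arr → Spec_maxPeople arr (maxPeople arr)

-- ===== LEMMAS AND PROOFS =====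

-- next-≥ index of position k (what both f and, after the reversal transform, s compute)
def pvNge (arr : List Int) (k : Nat) : Nat := pvNxt arr arr.length (arr.getD k 0) (k + 1)

-- ---- pvNxt characterisation ----
theorem pvNxt_ge (arr : List Int) (n : Nat) (ai : Int) (j : Nat) : j ≤ pvNxt arr n ai j := by
  induction j using pvNxt.induct arr n ai with
  | case1 j h hlt ih => rw [pvNxt, dif_pos h, if_pos hlt]; omega
  | case2 j h hlt => rw [pvNxt, dif_pos h, if_neg hlt]
  | case3 j h => rw [pvNxt, dif_neg h]

theorem pvNxt_le (arr : List Int) (n : Nat) (ai : Int) (j : Nat) (h : j ≤ n) :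
    pvNxt arr n ai j ≤ n := by
  induction j using pvNxt.induct arr n ai with
  | case1 j h1 hlt ih => rw [pvNxt, dif_pos h1, if_pos hlt]; exact ih (by omega)
  | case2 j h1 hlt => rw [pvNxt, dif_pos h1, if_neg hlt]; omega
  | case3 j h1 => rw [pvNxt, dif_neg h1]; omega

theorem pvNxt_below (arr : List Int) (n : Nat) (ai : Int) (j : Nat) :
    ∀ m, j ≤ m → m < pvNxt arr n ai j → arr.getD m 0 < ai := by
  induction j using pvNxt.induct arr n ai with
  | case1 j h hlt ih =>
      intro m hm1 hm2
      rw [pvNxt, dif_pos h, if_pos hlt] at hm2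
      rcases Nat.eq_or_lt_of_le hm1 with rfl | h'
      · exact hlt
      · exact ih m h' hm2
  | case2 j h hlt =>
      intro m hm1 hm2
      rw [pvNxt, dif_pos h, if_neg hlt] at hm2; omega
  | case3 j h =>
      intro m hm1 hm2
      rw [pvNxt, dif_neg h] at hm2; omega

theorem pvNxt_stop (arr : List Int) (n : Nat) (ai : Int) (j : Nat)
    (h : pvNxt arr n ai j < n) : ai ≤ arr.getD (pvNxt arr n ai j) 0 := by
  induction j using pvNxt.induct arr n ai with
  | case1 j h1 hlt ih => rw [pvNxt, dif_pos h1, if_pos hlt] at h ⊢; exact ih h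
  | case2 j h1 hlt => rw [pvNxt, dif_pos h1, if_neg hlt] at h ⊢; omega
  | case3 j h1 => rw [pvNxt, dif_neg h1] at h; omega

theorem pvNxt_unique (arr : List Int) (n : Nat) (ai : Int) (j k : Nat)
    (h1 : j ≤ k) (h2 : k ≤ n) (h3 : ∀ m, j ≤ m → m < k → arr.getD m 0 < ai)
    (h4 : k = n ∨ ai ≤ arr.getD k 0) : pvNxt arr n ai j = k := by
  induction j using pvNxt.induct arr n ai with
  | case1 j h hlt ih =>
      rw [pvNxt, dif_pos h, if_pos hlt]
      rcases Nat.eq_or_lt_of_le h1 with rfl | h'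
      · rcases h4 with rfl | h4; omega; omega
      · exact ih h' (fun m hm1 hm2 => h3 m (by omega) hm2)
  | case2 j h hlt =>
      rw [pvNxt, dif_pos h, if_neg hlt]
      rcases Nat.eq_or_lt_of_le h1 with rfl | h'
      · rfl
      · exact absurd (h3 j (le_refl j) h') hlt
  | case3 j h =>
      rw [pvNxt, dif_neg h]; omega

theorem pvPrv_unique (arr : List Int) (ai : Int) (j m : Nat)
    (h1 : m ≤ j) (h2 : ∀ t, m ≤ t → t < j → arr.getD t 0 < ai)
    (h3 : m = 0 ∨ ai ≤ arr.getD (m - 1) 0) : pvPrv arr ai j = m := by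
  induction j using pvPrv.induct arr ai with
  | case1 j h hlt ih =>
      rw [pvPrv, dif_pos h, if_pos hlt]
      have hm : m ≤ j - 1 := by
        rcases Nat.eq_or_lt_of_le h1 with rfl | h'
        · rcases h3 with rfl | h3; omega
          exact absurd hlt (by omega : ¬ arr.getD (m-1) 0 < ai)
        · omega
      exact ih hm (fun t ht1 ht2 => h2 t ht1 (by omega))
  | case2 j h hlt =>
      rw [pvPrv, dif_pos h, if_neg hlt]
      rcases Nat.eq_or_lt_of_le h1 with rfl | h'
      · rfl
      · exact absurd (h2 (j-1) (by omega) (by omega)) hlt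
  | case3 j h =>
      rw [pvPrv, dif_neg h]; omega

theorem pvRev_getD (arr : List Int) (p : Nat) (hp : p < arr.length) :
    arr.reverse.getD p 0 = arr.getD (arr.length - 1 - p) 0 := by
  rw [List.getD_eq_getElem _ _ (by simpa using hp),
      List.getD_eq_getElem _ _ (by omega),
      List.getElem_reverse]

theorem pvPrv_eq_rev (arr : List Int) (ai : Int) (i : Nat) (hi : i ≤ arr.length) :
    pvPrv arr ai i = arr.length - pvNxt arr.reverse arr.length ai (arr.length - i) := by
  set n := arr.length with hn
  set q := pvNxt arr.reverse n ai (n - i) with hq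
  have hq1 : n - i ≤ q := pvNxt_ge _ _ _ _
  have hq2 : q ≤ n := pvNxt_le _ _ _ _ (by omega)
  apply pvPrv_unique
  · omega
  · intro t ht1 ht2
    have hm' : n - 1 - t < q := by omega
    have hm'' : n - i ≤ n - 1 - t := by omega
    have := pvNxt_below arr.reverse n ai (n - i) (n - 1 - t) hm'' hm'
    rwa [pvRev_getD _ _ (by omega), show n - 1 - (n - 1 - t) = t by omega] at this
  · by_cases hqn : q = n
    · left; omega
    · right
      have hq3 : q < n := by omega
      have := pvNxt_stop arr.reverse n ai (n - i) hq3
      rwa [pvRev_getD _ _ (by omega), show n - 1 - q = n - q - 1 by omega] at this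

-- ---- foldl-of-set bookkeeping ----
theorem pvSetFold_length (ks : List Nat) (v : Int) (fw : List Int) :
    (ks.foldl (fun f t => f.set t v) fw).length = fw.length := by
  induction ks generalizing fw with
  | nil => rfl
  | cons t ks ih => simp [List.foldl_cons, ih]

theorem pvSetFold_not_mem (ks : List Nat) (v : Int) (fw : List Int) (k : Nat) (hk : k ∉ ks) :
    (ks.foldl (fun f t => f.set t v) fw).getD k 0 = fw.getD k 0 := by
  induction ks generalizing fw with
  | nil => rfl
  | cons t ks ih =>
      simp only [List.foldl_cons]
      rw [ih (fw.set t v) (fun h => hk (List.mem_cons_of_mem t h))]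
      rw [List.getD_eq_getElem?_getD, List.getD_eq_getElem?_getD,
          List.getElem?_set_ne (fun h => hk (by simp [h]))]

theorem pvSetFold_mem (ks : List Nat) (v : Int) (fw : List Int) (k : Nat)
    (hk : k ∈ ks) (hl : k < fw.length) :
    (ks.foldl (fun f t => f.set t v) fw).getD k 0 = v := by
  induction ks generalizing fw with
  | nil => cases hk
  | cons t ks ih =>
      simp only [List.foldl_cons]
      by_cases hmem : k ∈ ks
      · exact ih (fw.set t v) hmem (by simpa using hl)
      · have ht : t = k := by rcases List.mem_cons.1 hk with h | h; omega; exact absurd h hmem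
        subst ht
        rw [pvSetFold_not_mem ks v _ t hmem,
            List.getD_eq_getElem?_getD, List.getElem?_set_self hl]
        rfl

-- ---- the pop loop on a value-sorted stack = a pair of filters ----
theorem pvPop_spec (arr : List Int) (ai : Int) (i : Nat) (st : List Nat) (fw : List Int)
    (hst : st.Pairwise (fun x y => arr.getD x 0 < arr.getD y 0)) :
    pvPop arr ai i st fw =
      (st.filter (fun k => !(arr.getD k 0 ≤ ai)),
       (st.filter (fun k => arr.getD k 0 ≤ ai)).foldl (fun f t => f.set t (i : Int)) fw) := by
  induction st generalizing fw with
  | nil => rfl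
  | cons t st ih =>
      rw [List.pairwise_cons] at hst
      by_cases hc : arr.getD t 0 ≤ ai
      · have e : decide (arr.getD t 0 ≤ ai) = true := decide_eq_true hc
        rw [pvPop, if_pos hc, ih _ hst.2, List.filter_cons, List.filter_cons, e]
        simp
      · have e : decide (arr.getD t 0 ≤ ai) = false := decide_eq_false hc
        have h1 : st.filter (fun k => !(arr.getD k 0 ≤ ai)) = st := by
          apply List.filter_eq_self.2
          intro x hx
          have := hst.1 x hx
          simp only [Bool.not_eq_eq_eq_not, Bool.not_true, decide_eq_false_iff_not]
          omega
        have h2 : st.filter (fun k => arr.getD k 0 ≤ ai) = [] := by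
          apply List.filter_eq_nil_iff.2
          intro x hx
          have := hst.1 x hx
          simp only [decide_eq_true_eq]
          omega
        rw [pvPop, if_neg hc, List.filter_cons, List.filter_cons, e, h1, h2]
        simp

-- ---- the loop invariant of rec ----
theorem pvRec_inv (arr : List Int) (i : Nat) (hi : i ≤ arr.length) :
    ((List.range i).foldl (pvStep arr) ([], List.replicate arr.length (arr.length : Int))).1
        = ((List.range i).filter (fun k => i ≤ pvNge arr k)).reverse ∧
    ((List.range i).foldl (pvStep arr) ([], List.replicate arr.length (arr.length : Int))).2.length
        = arr.length ∧
    ∀ k, k < arr.length →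
      ((List.range i).foldl (pvStep arr) ([], List.replicate arr.length (arr.length : Int))).2.getD k 0
        = if pvNge arr k < i then (pvNge arr k : Int) else (arr.length : Int) := by
  induction i with
  | zero =>
      refine ⟨rfl, by simp, ?_⟩
      intro k hk
      simp [List.getD_eq_getElem?_getD, hk]
  | succ i ih =>
      obtain ⟨hst, hlen, hfw⟩ := ih (by omega)
      have hin : i < arr.length := by omega
      rw [List.range_succ, List.foldl_append, List.foldl_cons, List.foldl_nil]
      set S := (List.range i).foldl (pvStep arr) ([], List.replicate arr.length (arr.length : Int)) with hS
      -- the stack is strictly value-sorted (head = top has the smallest value)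
      have hpair : S.1.Pairwise (fun x y => arr.getD x 0 < arr.getD y 0) := by
        rw [hst, List.pairwise_reverse]
        refine List.Pairwise.imp_of_mem ?_
          (List.Pairwise.filter (fun k => decide (i ≤ pvNge arr k)) List.pairwise_lt_range)
        intro x y hx hy hxy
        rw [List.mem_filter, List.mem_range] at hx hy
        have hx2 : i ≤ pvNge arr x := by simpa using hx.2
        have hrfl : pvNxt arr arr.length (arr.getD x 0) (x + 1) = pvNge arr x := rfl
        exact pvNxt_below arr arr.length (arr.getD x 0) (x + 1) y (by omega) (by omega)
      have hpop := pvPop_spec arr (arr.getD i 0) i S.1 S.2 hpair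
      have hstep : pvStep arr S i =
          (i :: S.1.filter (fun k => !(arr.getD k 0 ≤ arr.getD i 0)),
           (S.1.filter (fun k => arr.getD k 0 ≤ arr.getD i 0)).foldl
             (fun f t => f.set t (i : Int)) S.2) := by
        rw [pvStep, hpop]
      rw [hstep]
      -- membership characterisation of the current stack
      have hmemS : ∀ k, k ∈ S.1 ↔ (k < i ∧ i ≤ pvNge arr k) := by
        intro k
        rw [hst, List.mem_reverse, List.mem_filter, List.mem_range]
        simp
      refine ⟨?_, ?_, ?_⟩
      · -- the new stack
        have hcong : List.filter (fun k => !decide (arr.getD k 0 ≤ arr.getD i 0) && decide (i ≤ pvNge arr k)) (List.range i)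
            = List.filter (fun k => decide (i + 1 ≤ pvNge arr k)) (List.range i) := by
          apply List.filter_congr
          intro x hx
          have hxi : x < i := List.mem_range.1 hx
          have hrfl : pvNxt arr arr.length (arr.getD x 0) (x + 1) = pvNge arr x := rfl
          by_cases h1 : i + 1 ≤ pvNge arr x
          · have hgt : arr.getD i 0 < arr.getD x 0 :=
              pvNxt_below arr arr.length (arr.getD x 0) (x + 1) i (by omega) (by omega)
            have h0 : i ≤ pvNge arr x := by omega
            rw [decide_eq_true h1, decide_eq_true h0,
                decide_eq_false (by omega : ¬ arr.getD x 0 ≤ arr.getD i 0)]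
            rfl
          · by_cases h0 : i ≤ pvNge arr x
            · have hei : pvNge arr x = i := by omega
              have hle : arr.getD x 0 ≤ arr.getD i 0 := by
                have := pvNxt_stop arr arr.length (arr.getD x 0) (x + 1)
                  (by rw [show pvNxt arr arr.length (arr.getD x 0) (x+1) = pvNge arr x from rfl, hei]; omega)
                rwa [show pvNxt arr arr.length (arr.getD x 0) (x+1) = pvNge arr x from rfl, hei] at this
              rw [decide_eq_false h1, decide_eq_true h0, decide_eq_true hle]
              rfl
            · rw [decide_eq_false h1, decide_eq_false h0]
              simp
        have hngei : i + 1 ≤ pvNge arr i := pvNxt_ge arr arr.length (arr.getD i 0) (i + 1)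
        show i :: S.1.filter (fun k => !(arr.getD k 0 ≤ arr.getD i 0))
            = ((List.range i ++ [i]).filter (fun k => i + 1 ≤ pvNge arr k)).reverse
        rw [List.filter_append, List.reverse_append,
            show (List.filter (fun k => decide (i + 1 ≤ pvNge arr k)) [i]) = [i] by
              rw [List.filter_cons, List.filter_nil,
                  if_pos (decide_eq_true hngei)],
            hst, List.filter_reverse, List.filter_filter, hcong]
        simp
      · -- length
        show ((S.1.filter _).foldl _ S.2).length = arr.length
        rw [pvSetFold_length, hlen]
      · -- fw entries
        intro k hk
        show ((S.1.filter (fun t => arr.getD t 0 ≤ arr.getD i 0)).foldl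
                (fun f t => f.set t (i : Int)) S.2).getD k 0
            = if pvNge arr k < i + 1 then (pvNge arr k : Int) else (arr.length : Int)
        have hrn : pvNxt arr arr.length (arr.getD k 0) (k + 1) = pvNge arr k := rfl
        by_cases hmem : k ∈ S.1.filter (fun t => decide (arr.getD t 0 ≤ arr.getD i 0))
        · have hmem' := hmem
          rw [List.mem_filter] at hmem'
          have hk1 : k < i ∧ i ≤ pvNge arr k := (hmemS k).1 hmem'.1
          have hc : arr.getD k 0 ≤ arr.getD i 0 := by simpa using hmem'.2
          have hnge : pvNge arr k = i := by
            apply pvNxt_unique arr arr.length (arr.getD k 0) (k+1) i (by omega) (by omega)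
            · intro m hm1 hm2
              exact pvNxt_below arr arr.length (arr.getD k 0) (k + 1) m hm1 (by omega)
            · exact Or.inr hc
          rw [pvSetFold_mem _ _ _ _ hmem (by omega), hnge, if_pos (by omega)]
        · rw [pvSetFold_not_mem _ _ _ _ hmem, hfw k hk]
          have hne : pvNge arr k ≠ i := by
            intro hei
            apply hmem
            rw [List.mem_filter]
            have hki : k < i := by
              have := pvNxt_ge arr arr.length (arr.getD k 0) (k + 1)
              rw [show pvNxt arr arr.length (arr.getD k 0) (k+1) = pvNge arr k from rfl] at this
              omega
            have hc : arr.getD k 0 ≤ arr.getD i 0 := by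
              have := pvNxt_stop arr arr.length (arr.getD k 0) (k + 1)
                (by rw [show pvNxt arr arr.length (arr.getD k 0) (k+1) = pvNge arr k from rfl, hei]; omega)
              rwa [show pvNxt arr arr.length (arr.getD k 0) (k+1) = pvNge arr k from rfl, hei] at this
            exact ⟨(hmemS k).2 ⟨hki, by omega⟩, by simpa using hc⟩
          by_cases h1 : pvNge arr k < i
          · rw [if_pos h1, if_pos (by omega)]
          · rw [if_neg h1, if_neg (by omega)]

theorem pvRec_eq (arr : List Int) :
    pvRec arr arr.length = (List.range arr.length).map (fun k => (pvNge arr k : Int)) := by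
  obtain ⟨-, hlen, hfw⟩ := pvRec_inv arr arr.length (le_refl _)
  apply List.ext_getElem
  · unfold pvRec; rw [hlen]; simp
  · intro k h1 h2
    unfold pvRec at h1 ⊢
    rw [← List.getD_eq_getElem _ 0 h1, hfw k (by omega)]
    have hle : pvNge arr k ≤ arr.length :=
      pvNxt_le arr arr.length (arr.getD k 0) (k + 1) (by simp at h2; omega)
    have hk : k < arr.length := by simp at h2; omega
    rw [List.getElem_map, List.getElem_range]
    by_cases hc : pvNge arr k < arr.length
    · rw [if_pos hc]
    · rw [if_neg hc]
      have : pvNge arr k = arr.length := by omega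
      rw [this]

-- reversal of a comprehension over range n, as index arithmetic
theorem pvRevMapRange (g : Nat → Int) (n : Nat) :
    ((List.range n).map g).reverse = (List.range n).map (fun k => g (n - 1 - k)) := by
  apply List.ext_getElem
  · simp
  · intro k h1 h2
    rw [List.getElem_reverse]
    simp only [List.getElem_map, List.getElem_range, List.length_map, List.length_range]

theorem pvLists_eq (arr : List Int) :
    ((pvRec arr arr.length).zip
        (((pvRec arr.reverse arr.length).map (fun x => (arr.length : Int) - x)).reverse)).map
      (fun p => p.1 - p.2)
    = (List.range arr.length).map (fun i =>
        (pvNxt arr arr.length (arr.getD i 0) (i + 1) : Int) - (pvPrv arr (arr.getD i 0) i : Int)) := by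
  have hrevlen : arr.reverse.length = arr.length := List.length_reverse
  have hs0 : pvRec arr.reverse arr.length
      = (List.range arr.length).map (fun k => (pvNge arr.reverse k : Int)) := by
    have h := pvRec_eq arr.reverse
    rwa [hrevlen] at h
  rw [pvRec_eq arr, hs0, List.map_map, pvRevMapRange, List.zip_map', List.map_map]
  apply List.map_congr_left
  intro k hk
  have hkn : k < arr.length := List.mem_range.1 hk
  have hprv : (pvPrv arr (arr.getD k 0) k : Int)
      = (arr.length : Int) - (pvNge arr.reverse (arr.length - 1 - k) : Int) := by
    have h1 : pvNge arr.reverse (arr.length - 1 - k)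
        = pvNxt arr.reverse arr.length (arr.getD k 0) (arr.length - k) := by
      unfold pvNge
      rw [hrevlen, pvRev_getD arr (arr.length - 1 - k) (by omega),
          show arr.length - 1 - (arr.length - 1 - k) = k by omega,
          show arr.length - 1 - k + 1 = arr.length - k by omega]
    rw [h1, pvPrv_eq_rev arr (arr.getD k 0) k (by omega)]
    have hq2 : pvNxt arr.reverse arr.length (arr.getD k 0) (arr.length - k) ≤ arr.length :=
      pvNxt_le _ _ _ _ (by omega)
    omega
  rw [hprv]
  rfl

-- ===== VERDICT (by name: the statement is the Claim_ definition above) =====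
theorem maxPeople_spec : Claim_equal_maxPeople := by
  intro arr _hdom _hpre
  show maxPeople arr = maxPeople_alt arr
  unfold maxPeople maxPeople_alt
  simp only [pvLists_eq arr]
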